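-- pv_equiv track=rewrite | github.com/radu-solca/IA_Labs | hanoi_towers/fitness_test.py | stickAndCarrot
-- ===== SOURCE A (Python) =====
-- def stickAndCarrot(state) :
-- 	score = 0
-- 	for disk, stack in reversed(list(enumerate(state))):
--
-- 		if stack == 3:
-- 		#if this disk is at the goal stack
-- 		#apply it's weight as a reward
-- 			score += disk + 1
-- 		else:
-- 			smallerDisk = disk - 1
-- 			while smallerDisk >= 0 :
-- 			#for each smaller disk:
--
-- 				smallerDisksStack = state[smallerDisk]
--
-- 				if smallerDisksStack == stack or smallerDisksStack == 3 :
-- 				#if the smaller disk is blocking the larger one's way to the goal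
-- 				#apply the disk's weight as a penalty
-- 					score -= disk + 1
--
-- 				smallerDisk -= 1
--
-- 	return score;
-- ===== SOURCE B (Python) =====
-- def stickAndCarrot(state):
--     counts = {}
--     score = 0
--     for disk, stack in enumerate(state):
--         if stack == 3:
--             score += disk + 1
--         else:
--             score -= (disk + 1) * (counts.get(stack, 0) + counts.get(3, 0))
--         counts[stack] = counts.get(stack, 0) + 1
--     return score
-- ===== Notes on version B (the rewrite author's own statement) =====
-- stated objective: faster
-- what changed: Replaced A's inner while-loop that rescans all smaller disks for each disk by a single forward pass maintaining a dictionary counting how many already-seen (smaller) disks sit on each stack, so each disk's penalty is (disk+1)*(counts[stack]+counts[3]) in O(1).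
import Mathlib
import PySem

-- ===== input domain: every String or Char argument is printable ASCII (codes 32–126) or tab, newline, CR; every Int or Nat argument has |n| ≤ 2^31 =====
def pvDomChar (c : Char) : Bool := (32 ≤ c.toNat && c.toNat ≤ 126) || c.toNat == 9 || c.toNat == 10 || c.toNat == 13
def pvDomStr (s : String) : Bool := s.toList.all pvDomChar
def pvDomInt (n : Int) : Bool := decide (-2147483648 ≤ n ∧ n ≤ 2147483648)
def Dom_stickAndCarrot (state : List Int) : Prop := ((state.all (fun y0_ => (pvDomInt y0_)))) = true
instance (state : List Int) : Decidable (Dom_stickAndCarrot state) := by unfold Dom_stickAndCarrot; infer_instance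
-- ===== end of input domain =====

-- B replaces the quadratic inner scan over all smaller disks by one pass keeping
-- per-stack counts of already-seen (smaller) disks: penalty = (disk+1)*(counts[stack]+counts[3]).
-- ===== PORT A =====
-- inner 'while smallerDisk >= 0' loop: fuel n means smallerDisk = n-1 (counts down to 0);
-- state[smallerDisk] is always in range here, so pyGetD is exact.
def pvPenaltyLoop (state : List Int) (stack disk : Int) : Nat → Int → Int
  | 0, score => score
  | n+1, score =>
      let smallerDisksStack := PySem.List.pyGetD state (n : Int) 0
      pvPenaltyLoop state stack disk n
        (if smallerDisksStack == stack || smallerDisksStack == 3 then score - (disk + 1) else score)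

def stickAndCarrot (state : List Int) : Int :=
  (PySem.List.enumerate state 0).reverse.foldl
    (fun score p =>
      if p.2 == 3 then score + (p.1 + 1)
      else pvPenaltyLoop state p.2 p.1 p.1.toNat score) 0

-- ===== PORT B =====
-- B: one pass, counts[v] = how many smaller disks sit on stack v so far;
-- penalty per disk = (disk+1) * (counts[stack] + counts[3]).
def stickAndCarrot_alt (state : List Int) : Int :=
  ((PySem.List.enumerate state 0).foldl
    (fun acc p =>
      let score := if p.2 == 3 then acc.2 + (p.1 + 1)
        else acc.2 - (p.1 + 1) * (acc.1.getD p.2 0 + acc.1.getD 3 0)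
      (acc.1.insert p.2 (acc.1.getD p.2 0 + 1), score))
    ((PySem.Dict.empty : PySem.Dict Int Int), (0 : Int))).2

-- ===== PRECONDITION & SPEC =====
def Spec_stickAndCarrot (state : List Int) (out : Int) : Prop := out = stickAndCarrot_alt state
instance (state : List Int) (out : Int) : Decidable (Spec_stickAndCarrot state out) := by unfold Spec_stickAndCarrot; infer_instance

-- ===== CLAIM (what is proved, stated in full; the proofs are below) =====
def Claim_equal_stickAndCarrot : Prop := ∀ (state : List Int), Dom_stickAndCarrot state → Spec_stickAndCarrot state (stickAndCarrot state)

-- ===== LEMMAS AND PROOFS =====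

-- the common closed form: per-disk contribution, blockers counted over the prefix
def pvDelta (state : List Int) (p : Int × Int) : Int :=
  if p.2 == 3 then p.1 + 1
  else -((p.1 + 1) * ((state.take p.1.toNat).countP (fun s => s == p.2 || s == 3) : Int))

def pvSum (state : List Int) : Int :=
  ((PySem.List.enumerate state 0).map (pvDelta state)).sum

lemma pvPenalty_eq (state : List Int) (stack disk : Int) :
    ∀ (n : Nat), n ≤ state.length → ∀ score,
      pvPenaltyLoop state stack disk n score =
        score - (disk + 1) * ((state.take n).countP (fun s => s == stack || s == 3) : Int) := by
  intro n
  induction n with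
  | zero => intro _ score; simp [pvPenaltyLoop]
  | succ n ih =>
      intro hn score
      have hlt : n < state.length := by omega
      rw [pvPenaltyLoop, ih (by omega)]
      rw [List.take_succ_eq_append_getElem hlt, List.countP_append]
      have hget : PySem.List.pyGetD state (n : Int) 0 = state[n] := by
        simp [PySem.List.pyGetD_natCast, List.getD, List.getElem?_eq_getElem hlt]
      rw [hget]
      cases h : (state[n] == stack || state[n] == 3)
      · simp [h]
      · simp only [h, if_pos, List.countP_singleton]
        simp
        ring

lemma pvA_eq_sum (state : List Int) : stickAndCarrot state = pvSum state := by
  unfold stickAndCarrot pvSum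
  rw [PySem.List.foldl_congr_mem (g := fun score p => score + pvDelta state p)]
  · rw [PySem.List.foldl_add, List.map_reverse, List.sum_reverse, zero_add]
  · intro acc p hp
    rw [List.mem_reverse, PySem.List.mem_enumerate_iff] at hp
    obtain ⟨k, hk, rfl⟩ := hp
    simp only [pvDelta]
    cases h : (state[k] == 3)
    · simp only [if_neg, Bool.false_eq_true, not_false_iff]
      have hN : ((0 : Int) + (k : Int)).toNat = k := by omega
      rw [hN, pvPenalty_eq state state[k] ((0:Int) + k) k (le_of_lt hk)]
      ring
    · simp

lemma pvCountP_eq (pre : List Int) (v : Int) (hv : (v == 3) = false) :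
    pre.countP (fun s => s == v || s == 3) = pre.count v + pre.count 3 := by
  induction pre with
  | nil => simp
  | cons x t ih =>
      rw [List.countP_cons, List.count_cons, List.count_cons, ih]
      have hv' : v ≠ 3 := by simpa using hv
      by_cases h1 : x = v <;> by_cases h2 : x = 3 <;>
        simp [h1, h2, hv', Ne.symm hv'] <;> omega

lemma pvB_inv (l : List Int) : ∀ (pre : List Int) (score : Int),
    ((PySem.List.enumerate l (pre.length : Int)).foldl
      (fun acc (p : Int × Int) =>
        let s := if p.2 == 3 then acc.2 + (p.1 + 1)
          else acc.2 - (p.1 + 1) * (acc.1.getD p.2 0 + acc.1.getD 3 0)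
        (acc.1.insert p.2 (acc.1.getD p.2 0 + 1), s))
      (pre.foldl (fun d x => d.insert x (d.getD x 0 + 1)) (PySem.Dict.empty : PySem.Dict Int Int), score)).2
    = score + ((PySem.List.enumerate l (pre.length : Int)).map (pvDelta (pre ++ l))).sum := by
  induction l with
  | nil => intro pre score; simp [PySem.List.enumerate_nil]
  | cons x t ih =>
      intro pre score
      rw [PySem.List.enumerate_cons]
      simp only [List.foldl_cons, List.map_cons, List.sum_cons]
      have hcnt : ∀ v : Int,
          (pre.foldl (fun d y => d.insert y (d.getD y 0 + 1))
            (PySem.Dict.empty : PySem.Dict Int Int)).getD v 0 = (pre.count v : Int) := by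
        intro v
        rw [PySem.Dict.getD_foldl_insert_add_one]
        simp
      have hstep :
          (((pre.foldl (fun d y => d.insert y (d.getD y 0 + 1))
              (PySem.Dict.empty : PySem.Dict Int Int)).insert x
              ((pre.foldl (fun d y => d.insert y (d.getD y 0 + 1))
                (PySem.Dict.empty : PySem.Dict Int Int)).getD x 0 + 1)),
           (if (x == 3) = true then score + ((pre.length : Int) + 1)
            else score - ((pre.length : Int) + 1) *
              ((pre.foldl (fun d y => d.insert y (d.getD y 0 + 1))
                (PySem.Dict.empty : PySem.Dict Int Int)).getD x 0 +
               (pre.foldl (fun d y => d.insert y (d.getD y 0 + 1))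
                (PySem.Dict.empty : PySem.Dict Int Int)).getD 3 0)))
          = ((pre ++ [x]).foldl (fun d y => d.insert y (d.getD y 0 + 1))
              (PySem.Dict.empty : PySem.Dict Int Int),
             score + pvDelta (pre ++ x :: t) ((pre.length : Int), x)) := by
        rw [List.foldl_append]
        simp only [List.foldl_cons, List.foldl_nil]
        refine Prod.ext rfl ?_
        simp only [pvDelta, hcnt, Int.toNat_natCast, List.take_left]
        cases h : (x == 3)
        · have hx : x ≠ 3 := by simpa using h
          simp only [Bool.false_eq_true, if_false, pvCountP_eq pre x h]
          push_cast
          ring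
        · simp
      rw [hstep]
      have hlen : ((pre ++ [x]).length : Int) = (pre.length : Int) + 1 := by
        simp
      have := ih (pre ++ [x]) (score + pvDelta (pre ++ x :: t) ((pre.length : Int), x))
      rw [hlen, List.append_assoc] at this
      simp only [List.cons_append, List.nil_append] at this
      rw [this]
      ring

lemma pvB_eq_sum (state : List Int) : stickAndCarrot_alt state = pvSum state := by
  have h := pvB_inv state [] 0
  simpa [stickAndCarrot_alt, pvSum] using h

-- ===== VERDICT (by name: the statement is the Claim_ definition above) =====
theorem stickAndCarrot_spec : Claim_equal_stickAndCarrot := by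
  intro state _
  unfold Spec_stickAndCarrot
  rw [pvA_eq_sum, pvB_eq_sum]
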